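-- pv_equiv track=rewrite | github.com/KIM-KYOUNG-OH/Algorithm-by-python | 가비아 코테/2.py | solution
-- ===== SOURCE A (Python) =====
-- def solution(s:str)->int:
--     alps = set()
--     for i in range(1, len(s)+1):
--         n = len(s)-i
--         for j in range(n+1):
--             word = s[j:j+i]
--             skip = 0
--             if len(word)>1:
--                 alp_before = set([word[0]])
--                 for k in range(1, len(word)):
--                     if word[k] in alp_before:
--                         skip = 1
--                         break
--                     else:
--                         alp_before.add(word[k])
--             if skip == 1:
--                 continue
--             alps.add(word)
--
--     return len(alps)
-- ===== SOURCE B (Python) =====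
-- def solution(s: str) -> int:
--     # One pass per start: extend the window until the first repeated character,
--     # collecting each grown substring; no per-substring uniqueness re-scan.
--     found = set()
--     for start in range(len(s)):
--         seen = set()
--         cur = ""
--         for c in s[start:]:
--             if c in seen:
--                 break
--             seen.add(c)
--             cur += c
--             found.add(cur)
--     return len(found)
-- ===== Notes on version B (the rewrite author's own statement) =====
-- stated objective: faster
-- what changed: Replaces the length-major triple loop that re-scans every substring for duplicate characters with a single sliding extension per start position that stops at the first repeated character, so each candidate substring is produced once without a uniqueness re-scan.
import Mathlib
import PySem

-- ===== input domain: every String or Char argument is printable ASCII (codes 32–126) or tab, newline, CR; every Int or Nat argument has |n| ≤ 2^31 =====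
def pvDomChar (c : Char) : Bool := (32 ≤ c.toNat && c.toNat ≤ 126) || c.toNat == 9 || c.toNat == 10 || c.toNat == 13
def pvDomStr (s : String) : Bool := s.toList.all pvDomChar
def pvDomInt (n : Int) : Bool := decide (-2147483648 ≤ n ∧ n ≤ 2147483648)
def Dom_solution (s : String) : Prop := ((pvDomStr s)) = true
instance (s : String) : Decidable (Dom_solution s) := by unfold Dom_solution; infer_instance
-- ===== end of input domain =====

-- B replaces A's length-major triple loop (with a duplicate-character re-scan per substring)
-- by one sliding extension per start position; objective: faster.

-- ===== PORT A =====
-- inner k-loop of A: scan word[1:] against the set of characters already seen ('alp_before');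
-- returns true iff a repeated character is found (skip = 1)
def pvCheckA (cs : List Char) (seen : PySem.Set Char) : Bool :=
  match cs with
  | [] => false
  | c :: rest =>
      if PySem.Set.contains seen c then true
      else pvCheckA rest (PySem.Set.add seen c)

def solution (s : String) : Int :=
  let l := s.toList
  let n := l.length
  -- for i in range(1, len(s)+1): for j in range(len(s)-i+1):
  let alps := (List.range' 1 n).foldl (fun alps i =>
    (List.range (n - i + 1)).foldl (fun alps j =>
      let word := (l.drop j).take i        -- s[j:j+i], exact here: 0 ≤ j and j+i ≤ n
      let skip :=
        if word.length > 1 then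
          match word with
          | [] => false
          | c :: rest => pvCheckA rest (PySem.Set.add PySem.Set.empty c)  -- alp_before = {word[0]}
        else false
      if skip then alps else PySem.Set.add alps word) alps) PySem.Set.empty
  PySem.Set.len alps

-- ===== PORT B =====
-- inner loop of B: 'for c in s[start:]: if c in seen: break; seen.add(c); cur += c; found.add(cur)'
def pvGrowB (rest : List Char) (seen : PySem.Set Char) (cur : List Char)
    (found : PySem.Set (List Char)) : PySem.Set (List Char) :=
  match rest with
  | [] => found
  | c :: rs =>
      if PySem.Set.contains seen c then found
      else pvGrowB rs (PySem.Set.add seen c) (cur ++ [c])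
            (PySem.Set.add found (cur ++ [c]))

def solution_alt (s : String) : Int :=
  let l := s.toList
  let found := (List.range l.length).foldl (fun found start =>
      pvGrowB (l.drop start) PySem.Set.empty [] found) PySem.Set.empty
  PySem.Set.len found

-- ===== PRECONDITION & SPEC =====
def Spec_solution (s : String) (out : Int) : Prop := out = solution_alt s
instance (s : String) (out : Int) : Decidable (Spec_solution s out) := by unfold Spec_solution; infer_instance

-- ===== CLAIM (what is proved, stated in full; the proofs are below) =====
def Claim_equal_solution : Prop := ∀ (s : String), Dom_solution s → Spec_solution s (solution s)

-- ===== LEMMAS AND PROOFS =====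

-- A's inner scan returns false iff the scanned characters are pairwise distinct and disjoint from seen
theorem pvCheckA_false_iff (cs : List Char) (seen : PySem.Set Char) :
    pvCheckA cs seen = false ↔ cs.Nodup ∧ ∀ x ∈ cs, x ∉ seen := by
  induction cs generalizing seen with
  | nil => simp [pvCheckA]
  | cons c rest ih =>
      simp only [pvCheckA]
      by_cases h : c ∈ seen
      · rw [if_pos ((PySem.Set.contains_iff seen c).mpr h)]
        simp only [Bool.true_eq_false, false_iff, not_and]
        intro _ hall
        exact (hall c (List.mem_cons_self)) h
      · rw [if_neg (fun hc => h ((PySem.Set.contains_iff seen c).mp hc))]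
        rw [ih]
        simp only [List.nodup_cons, List.mem_cons]
        constructor
        · rintro ⟨hnd, hall⟩
          refine ⟨⟨fun hcr => hall c hcr (by rw [PySem.Set.mem_add]; exact Or.inr rfl), hnd⟩, ?_⟩
          rintro x (rfl | hx)
          · exact h
          · exact fun hmem => hall x hx (by rw [PySem.Set.mem_add]; exact Or.inl hmem)
        · rintro ⟨⟨hcr, hnd⟩, hall⟩
          refine ⟨hnd, fun x hx hmem => ?_⟩
          rcases (PySem.Set.mem_add seen c x).mp hmem with hmem' | rfl
          · exact hall x (Or.inr hx) hmem'
          · exact hcr hx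

-- the value of A's 'skip' flag is false exactly on duplicate-free words
theorem skipA_false_iff (word : List Char) :
    (if word.length > 1 then
        (match word with
         | [] => false
         | c :: rest => pvCheckA rest (PySem.Set.add PySem.Set.empty c))
      else false) = false ↔ word.Nodup := by
  match word with
  | [] => simp
  | [c] => simp
  | c :: d :: rest =>
      rw [if_pos (by simp)]
      show pvCheckA (d :: rest) (PySem.Set.add PySem.Set.empty c) = false ↔ _
      rw [show PySem.Set.add PySem.Set.empty c = [c] from rfl, pvCheckA_false_iff]
      simp only [List.nodup_cons, List.mem_cons]
      constructor
      · rintro ⟨hnd, hall⟩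
        refine ⟨?_, hnd⟩
        rintro (rfl | hc2)
        · exact hall c (Or.inl rfl) (Or.inl rfl)
        · exact hall c (Or.inr hc2) (Or.inl rfl)
      · rintro ⟨hc2, hnd⟩
        refine ⟨hnd, ?_⟩
        rintro x hx (rfl | hfalse)
        · exact hc2 hx
        · exact absurd hfalse (List.not_mem_nil)

-- generic: membership after a fold whose step has a membership characterization
theorem mem_foldl_step {α β : Type} (l : List α) (F : PySem.Set β → α → PySem.Set β)
    (Q : α → β → Prop)
    (h : ∀ acc x y, y ∈ F acc x ↔ y ∈ acc ∨ Q x y) (s : PySem.Set β) (y : β) :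
    y ∈ l.foldl F s ↔ y ∈ s ∨ ∃ x ∈ l, Q x y := by
  induction l generalizing s with
  | nil => simp
  | cons a t ih =>
      simp only [List.foldl_cons, ih, h, List.mem_cons]
      constructor
      · rintro ((hy | hq) | ⟨x, hx, hq⟩)
        · exact Or.inl hy
        · exact Or.inr ⟨a, Or.inl rfl, hq⟩
        · exact Or.inr ⟨x, Or.inr hx, hq⟩
      · rintro (hy | ⟨x, (rfl | hx), hq⟩)
        · exact Or.inl (Or.inl hy)
        · exact Or.inl (Or.inr hq)
        · exact Or.inr ⟨x, hx, hq⟩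

-- generic: a fold whose step preserves Nodup preserves Nodup
theorem nodup_foldl_step {α β : Type} (l : List α) (F : PySem.Set β → α → PySem.Set β)
    (h : ∀ acc x, List.Nodup acc → List.Nodup (F acc x)) (s : PySem.Set β)
    (hs : List.Nodup s) : List.Nodup (l.foldl F s) := by
  induction l generalizing s with
  | nil => exact hs
  | cons a t ih => exact ih (F s a) (h s a hs)

-- step shape shared by both ports: conditionally add one element
theorem mem_step_if_add {β : Type} [BEq β] [LawfulBEq β] (b : Bool) (acc : PySem.Set β)
    (v y : β) :
    y ∈ (if b then acc else PySem.Set.add acc v) ↔ y ∈ acc ∨ (b = false ∧ y = v) := by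
  cases b
  · simp [PySem.Set.mem_add]
  · simp

-- membership in B's inner sliding extension, under the invariant seen = chars of cur
theorem mem_pvGrowB (rest : List Char) (seen : PySem.Set Char) (cur : List Char)
    (found : PySem.Set (List Char)) (w : List Char)
    (hseen : ∀ x, x ∈ seen ↔ x ∈ cur) (hnd : cur.Nodup) :
    w ∈ pvGrowB rest seen cur found ↔
      w ∈ found ∨ ∃ k, 1 ≤ k ∧ k ≤ rest.length ∧ w = cur ++ rest.take k ∧
        (cur ++ rest.take k).Nodup := by
  induction rest generalizing seen cur found with
  | nil =>
      simp only [pvGrowB, List.length_nil, iff_self_or]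
      rintro ⟨k, hk1, hk2, _, _⟩; omega
  | cons c rs ih =>
      simp only [pvGrowB]
      by_cases hc : c ∈ cur
      · rw [if_pos ((PySem.Set.contains_iff seen c).mpr ((hseen c).mpr hc))]
        constructor
        · exact Or.inl
        · rintro (hw | ⟨k, hk1, _, _, hndk⟩)
          · exact hw
          · exfalso
            obtain ⟨k', rfl⟩ : ∃ k', k = k' + 1 := ⟨k - 1, by omega⟩
            rw [List.take_succ_cons, List.nodup_middle, List.nodup_cons] at hndk
            exact hndk.1 (List.mem_append.mpr (Or.inl hc))
      · rw [if_neg (fun hb => hc ((hseen c).mp ((PySem.Set.contains_iff seen c).mp hb)))]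
        have hndc : (cur ++ [c]).Nodup := by
          simp [List.nodup_append, hnd]
          exact fun a ha h => hc (h ▸ ha)
        rw [ih (PySem.Set.add seen c) (cur ++ [c]) _
              (fun x => by rw [PySem.Set.mem_add]; simp [hseen])
              hndc]
        rw [PySem.Set.mem_add]
        have hnd1 : (cur ++ (c :: rs).take 1).Nodup := by simpa using hndc
        constructor
        · rintro ((hf | rfl) | ⟨k, hk1, hk2, rfl, hndk⟩)
          · exact Or.inl hf
          · exact Or.inr ⟨1, le_refl 1, by simp, by simp, hnd1⟩
          · refine Or.inr ⟨k + 1, by omega, by simp; omega, ?_, ?_⟩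
            · simp [List.take_succ_cons]
            · simpa [List.take_succ_cons] using hndk
        · rintro (hf | ⟨k, hk1, hk2, rfl, hndk⟩)
          · exact Or.inl (Or.inl hf)
          · obtain ⟨k', rfl⟩ : ∃ k', k = k' + 1 := ⟨k - 1, by omega⟩
            match k' with
            | 0 => exact Or.inl (Or.inr (by simp))
            | Nat.succ k'' =>
                refine Or.inr ⟨k'' + 1, by omega, by simp at hk2; omega, ?_, ?_⟩
                · simp [List.take_succ_cons]
                · simpa [List.take_succ_cons] using hndk

-- B's inner extension preserves Nodup of the accumulated set
theorem nodup_pvGrowB (rest : List Char) (seen : PySem.Set Char) (cur : List Char)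
    (found : PySem.Set (List Char)) (h : List.Nodup found) :
    List.Nodup (pvGrowB rest seen cur found) := by
  induction rest generalizing seen cur found with
  | nil => exact h
  | cons c rs ih =>
      simp only [pvGrowB]
      split
      · exact h
      · exact ih _ _ _ (PySem.Set.nodup_add found _ h)

-- membership in A's final set: exactly the nonempty duplicate-free contiguous substrings
theorem mem_setA (l : List Char) (w : List Char) :
    w ∈ ((List.range' 1 l.length).foldl (fun alps i =>
      (List.range (l.length - i + 1)).foldl (fun alps j =>
        let word := (l.drop j).take i
        let skip :=
          if word.length > 1 then
            match word with
            | [] => false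
            | c :: rest => pvCheckA rest (PySem.Set.add PySem.Set.empty c)
          else false
        if skip then alps else PySem.Set.add alps word) alps) PySem.Set.empty) ↔
    ∃ i j, 1 ≤ i ∧ j + i ≤ l.length ∧ w = (l.drop j).take i ∧ w.Nodup := by
  rw [mem_foldl_step _ _
      (fun i y => ∃ j ∈ List.range (l.length - i + 1),
        ((l.drop j).take i).Nodup ∧ y = (l.drop j).take i)
      (fun acc i y => by
        rw [mem_foldl_step _ _
            (fun j y => ((l.drop j).take i).Nodup ∧ y = (l.drop j).take i)
            (fun acc2 j y => by
              dsimp only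
              rw [mem_step_if_add, skipA_false_iff]) acc y])]
  simp only [PySem.Set.empty, List.not_mem_nil, false_or, List.mem_range'_1, List.mem_range]
  constructor
  · rintro ⟨i, ⟨hi1, hi2⟩, j, hj, hnd, rfl⟩
    exact ⟨i, j, hi1, by omega, rfl, hnd⟩
  · rintro ⟨i, j, hi1, hij, rfl, hnd⟩
    exact ⟨i, ⟨hi1, by omega⟩, j, by omega, hnd, rfl⟩

-- membership in B's final set: the same substrings
theorem mem_setB (l : List Char) (w : List Char) :
    w ∈ ((List.range l.length).foldl (fun found start =>
        pvGrowB (l.drop start) PySem.Set.empty [] found) PySem.Set.empty) ↔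
    ∃ i j, 1 ≤ i ∧ j + i ≤ l.length ∧ w = (l.drop j).take i ∧ w.Nodup := by
  rw [mem_foldl_step _ _
      (fun start y => ∃ k, 1 ≤ k ∧ k ≤ (l.drop start).length ∧
        y = (l.drop start).take k ∧ ((l.drop start).take k).Nodup)
      (fun acc start y => by
        rw [mem_pvGrowB (l.drop start) PySem.Set.empty [] acc y (by simp [PySem.Set.empty])
            List.nodup_nil]
        simp only [List.nil_append])]
  simp only [PySem.Set.empty, List.not_mem_nil, false_or, List.mem_range, List.length_drop]
  constructor
  · rintro ⟨start, hs, k, hk1, hk2, rfl, hnd⟩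
    exact ⟨k, start, hk1, by omega, rfl, hnd⟩
  · rintro ⟨i, j, hi1, hij, rfl, hnd⟩
    exact ⟨j, by omega, i, hi1, by omega, rfl, hnd⟩

-- ===== VERDICT (by name: the statement is the Claim_ definition above) =====
theorem solution_spec : Claim_equal_solution := by
  intro s _
  unfold Spec_solution solution solution_alt
  simp only []
  set l := s.toList
  have hA : List.Nodup ((List.range' 1 l.length).foldl (fun alps i =>
      (List.range (l.length - i + 1)).foldl (fun alps j =>
        let word := (l.drop j).take i
        let skip :=
          if word.length > 1 then
            match word with
            | [] => false
            | c :: rest => pvCheckA rest (PySem.Set.add PySem.Set.empty c)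
          else false
        if skip then alps else PySem.Set.add alps word) alps) PySem.Set.empty) := by
    refine nodup_foldl_step _ _ (fun acc i hn => ?_) _ List.nodup_nil
    refine nodup_foldl_step _ _ (fun acc2 j hn2 => ?_) _ hn
    dsimp only
    split_ifs <;> first | exact hn2 | exact PySem.Set.nodup_add _ _ hn2
  have hB : List.Nodup ((List.range l.length).foldl (fun found start =>
      pvGrowB (l.drop start) PySem.Set.empty [] found) PySem.Set.empty) := by
    refine nodup_foldl_step _ _ (fun acc start hn => ?_) _ List.nodup_nil
    exact nodup_pvGrowB _ _ _ _ hn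
  have hperm := (List.perm_ext_iff_of_nodup hA hB).mpr (fun w => by
    rw [mem_setA l w, mem_setB l w])
  show ((_ : List (List Char)).length : Int) = _
  exact_mod_cast congrArg Int.ofNat hperm.length_eq
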